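-- pv_equiv track=rewrite | github.com/Shoaib-07/Breast-Cancer | mmain.py | determine_overall_stage
-- ===== SOURCE A (Python) =====
-- def determine_overall_stage(matched_stages):
--     t_stage = matched_stages.get("T")
--     n_stage = matched_stages.get("N")
--     m_stage = matched_stages.get("M")
--
--     # Input validation and normalization
--     def normalize_stage(stage):
--         if not stage:
--             return None
--         stage = stage.upper().strip()
--         # Remove prefixes if present
--         if not any(stage.startswith(x) for x in ["T", "N", "M"]):
--             for prefix in ["T", "N", "M"]:
--                 if prefix in stage:
--                     stage = stage[stage.find(prefix):]
--                     break
--         return stage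
--
--     t_stage = normalize_stage(t_stage)
--     n_stage = normalize_stage(n_stage)
--     m_stage = normalize_stage(m_stage)
--
--     # Metastatic disease is always Stage IV
--     if m_stage == "M1":
--         return "Stage IV"
--
--     # Enhanced staging logic based on AJCC 8th edition
--     if t_stage and n_stage:
--         # Stage 0
--         if t_stage in ["TIS", "TIS(DCIS)", "TIS(PAGET)"]:
--             return "Stage 0"
--
--         # Stage IA
--         if t_stage in ["T1", "T1MI", "T1A", "T1B", "T1C"] and n_stage == "N0":
--             return "Stage IA"
--
--         # Stage IB
--         if (t_stage in ["T0", "T1", "T1MI", "T1A", "T1B", "T1C"] and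
--             n_stage in ["N1MI", "N1MIC"]):
--             return "Stage IB"
--
--         # Stage IIA
--         if ((t_stage in ["T0", "T1", "T1MI", "T1A", "T1B", "T1C"] and
--              n_stage in ["N1", "N1A", "N1B", "N1C"]) or
--             (t_stage == "T2" and n_stage == "N0")):
--             return "Stage IIA"
--
--         # Stage IIB
--         if ((t_stage == "T2" and n_stage in ["N1", "N1A", "N1B", "N1C"]) or
--             (t_stage == "T3" and n_stage == "N0")):
--             return "Stage IIB"
--
--         # Stage IIIA
--         if ((t_stage in ["T0", "T1", "T1MI", "T1A", "T1B", "T1C", "T2"] and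
--              n_stage in ["N2", "N2A", "N2B"]) or
--             (t_stage == "T3" and n_stage in ["N1", "N1A", "N1B", "N1C", "N2", "N2A", "N2B"])):
--             return "Stage IIIA"
--
--         # Stage IIIB
--         if (t_stage in ["T4", "T4A", "T4B", "T4C"] and
--             n_stage in ["N0", "N1", "N1A", "N1B", "N1C", "N2", "N2A", "N2B"]):
--             return "Stage IIIB"
--
--         # Stage IIIC
--         if n_stage in ["N3", "N3A", "N3B", "N3C"]:
--             return "Stage IIIC"
--
--         # Special case for inflammatory breast cancer
--         if t_stage in ["T4D", "T4"]:
--             if n_stage in ["N0", "N1", "N1A", "N1B", "N1C", "N2", "N2A", "N2B"]: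
--                 return "Stage IIIB"
--             elif n_stage in ["N3", "N3A", "N3B", "N3C"]:
--                 return "Stage IIIC"
--
--     return "Stage Not Determined"
-- ===== SOURCE B (Python) =====
-- # B: parse the normalized T/N codes into small integer categories (TIS,T0..T4 /
-- # N0,N1MI,N1..N3) and read the overall stage off a 5x4 grid, replacing A's
-- # first-match if-cascade over overlapping literal lists; objective: simpler.
--
-- def _norm(stage):
--     if not stage:
--         return None
--     s = stage.upper().strip()
--     if s[:1] in ("T", "N", "M"):
--         return s
--     for p in ("T", "N", "M"):
--         i = s.find(p)
--         if i >= 0: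
--             return s[i:]
--     return s
--
--
-- def _t_code(t):
--     # TIS->0, T0->1, T1 family->2, T2->3, T3->4, T4 family->5, else None
--     if t[:1] != "T":
--         return None
--     body = t[1:]
--     if body in ("IS", "IS(DCIS)", "IS(PAGET)"):
--         return 0
--     if body[:1] in ("0", "1", "2", "3", "4"):
--         tails = ("", "MI", "A", "B", "C") if body[:1] == "1" else \
--                 ("", "A", "B", "C", "D") if body[:1] == "4" else ("",)
--         if body[1:] in tails:
--             return int(body[0]) + 1
--     return None
--
--
-- def _n_code(n):
--     # N0->0, N1MI/N1MIC->1, N1 family->2, N2 family->3, N3 family->4, else None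
--     if n[:1] != "N":
--         return None
--     body = n[1:]
--     if body == "0":
--         return 0
--     if body in ("1MI", "1MIC"):
--         return 1
--     if body[:1] in ("1", "2", "3"):
--         tails = ("", "A", "B") if body[:1] == "2" else ("", "A", "B", "C")
--         if body[1:] in tails:
--             return int(body[0]) + 1
--     return None
--
--
-- # rows: T0..T4 (t_code-1); columns: N0, N1MI, N1, N2 (n_code)
-- _STAGE_GRID = (
--     ("Stage Not Determined", "Stage IB", "Stage IIA", "Stage IIIA"),
--     ("Stage IA", "Stage IB", "Stage IIA", "Stage IIIA"),
--     ("Stage IIA", "Stage Not Determined", "Stage IIB", "Stage IIIA"),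
--     ("Stage IIB", "Stage Not Determined", "Stage IIIA", "Stage IIIA"),
--     ("Stage IIIB", "Stage Not Determined", "Stage IIIB", "Stage IIIB"),
-- )
--
--
-- def determine_overall_stage(matched_stages):
--     t = _norm(matched_stages.get("T"))
--     n = _norm(matched_stages.get("N"))
--     m = _norm(matched_stages.get("M"))
--     if m == "M1":
--         return "Stage IV"
--     if not t or not n:
--         return "Stage Not Determined"
--     tc = _t_code(t)
--     if tc == 0:
--         return "Stage 0"
--     nc = _n_code(n)
--     if nc == 4:
--         return "Stage IIIC"
--     if tc is None or nc is None:
--         return "Stage Not Determined"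
--     return _STAGE_GRID[tc - 1][nc]
-- ===== Notes on version B (the rewrite author's own statement) =====
-- stated objective: alternative
-- what changed: Replaced A's first-match if-cascade over overlapping T/N literal lists by parsing each normalized T/N string into a small integer category code (TIS,T0..T4 / N0,N1MI,N1..N3) and reading the overall stage from a 5x4 grid, keeping the normalize step and the M1 short-circuit.
import Mathlib
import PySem

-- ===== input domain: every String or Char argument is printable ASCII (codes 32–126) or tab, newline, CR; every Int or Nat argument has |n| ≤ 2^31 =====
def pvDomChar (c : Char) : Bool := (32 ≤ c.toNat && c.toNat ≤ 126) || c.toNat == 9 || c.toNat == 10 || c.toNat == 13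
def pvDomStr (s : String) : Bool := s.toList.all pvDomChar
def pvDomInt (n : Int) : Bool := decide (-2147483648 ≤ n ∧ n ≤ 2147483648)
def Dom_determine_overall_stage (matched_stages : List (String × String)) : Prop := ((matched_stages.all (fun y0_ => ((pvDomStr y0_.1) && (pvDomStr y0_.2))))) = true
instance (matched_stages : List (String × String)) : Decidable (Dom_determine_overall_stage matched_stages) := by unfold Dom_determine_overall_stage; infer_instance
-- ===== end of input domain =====

-- B parses the normalized T/N codes into small integer categories and reads the overall
-- stage off a 5x4 grid, replacing A's first-match if-cascade; objective: alternative.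

-- ===== PORT A =====

-- for prefix in ["T","N","M"]: if prefix in stage: stage = stage[stage.find(prefix):]; break
def pvPrefLoopA (stage : String) : List String → String
  | [] => stage
  | p :: rest =>
      if PySem.Str.isIn p stage = true then
        PySem.Str.slice stage (some (PySem.Str.find stage p)) none
      else pvPrefLoopA stage rest

def pvNormalizeA (stage? : Option String) : Option String :=
  match stage? with
  | none => none
  | some s =>
      if s = "" then none
      else
        let s1 := PySem.Str.strip (PySem.Str.upper s)
        if (["T", "N", "M"].any (fun x => PySem.Str.startswith s1 x)) = false then
          some (pvPrefLoopA s1 ["T", "N", "M"])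
        else some s1

-- the if-cascade after `if t_stage and n_stage:` (t, n truthy)
def pvCascadeA (t n : String) : String :=
  if t ∈ ["TIS", "TIS(DCIS)", "TIS(PAGET)"] then "Stage 0"
  else if t ∈ ["T1", "T1MI", "T1A", "T1B", "T1C"] ∧ n = "N0" then "Stage IA"
  else if t ∈ ["T0", "T1", "T1MI", "T1A", "T1B", "T1C"] ∧ n ∈ ["N1MI", "N1MIC"] then "Stage IB"
  else if (t ∈ ["T0", "T1", "T1MI", "T1A", "T1B", "T1C"] ∧ n ∈ ["N1", "N1A", "N1B", "N1C"]) ∨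
          (t = "T2" ∧ n = "N0") then "Stage IIA"
  else if (t = "T2" ∧ n ∈ ["N1", "N1A", "N1B", "N1C"]) ∨ (t = "T3" ∧ n = "N0") then "Stage IIB"
  else if (t ∈ ["T0", "T1", "T1MI", "T1A", "T1B", "T1C", "T2"] ∧ n ∈ ["N2", "N2A", "N2B"]) ∨
          (t = "T3" ∧ n ∈ ["N1", "N1A", "N1B", "N1C", "N2", "N2A", "N2B"]) then "Stage IIIA"
  else if t ∈ ["T4", "T4A", "T4B", "T4C"] ∧
          n ∈ ["N0", "N1", "N1A", "N1B", "N1C", "N2", "N2A", "N2B"] then "Stage IIIB"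
  else if n ∈ ["N3", "N3A", "N3B", "N3C"] then "Stage IIIC"
  else if t ∈ ["T4D", "T4"] then
    if n ∈ ["N0", "N1", "N1A", "N1B", "N1C", "N2", "N2A", "N2B"] then "Stage IIIB"
    else if n ∈ ["N3", "N3A", "N3B", "N3C"] then "Stage IIIC"
    else "Stage Not Determined"
  else "Stage Not Determined"

def determine_overall_stage (matched_stages : List (String × String)) : String :=
  let d := PySem.Dict.ofList matched_stages
  let t? := pvNormalizeA (d.get? "T")
  let n? := pvNormalizeA (d.get? "N")
  let m? := pvNormalizeA (d.get? "M")
  if m? = some "M1" then "Stage IV"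
  else
    match t?, n? with
    | some t, some n => if t ≠ "" ∧ n ≠ "" then pvCascadeA t n else "Stage Not Determined"
    | _, _ => "Stage Not Determined"

-- ===== PORT B =====

-- for p in ("T","N","M"): i = s.find(p); if i >= 0: return s[i:]   — then: return s
def pvFindLoopB (s : String) : List String → String
  | [] => s
  | p :: rest =>
      if 0 ≤ PySem.Str.find s p then PySem.Str.slice s (some (PySem.Str.find s p)) none
      else pvFindLoopB s rest

def pvNormB (stage? : Option String) : Option String :=
  match stage? with
  | none => none
  | some st =>
      if st = "" then none
      else
        let s := PySem.Str.strip (PySem.Str.upper st)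
        if PySem.Str.slice s (some 0) (some 1) ∈ ["T", "N", "M"] then some s
        else some (pvFindLoopB s ["T", "N", "M"])

-- _t_code: the slices t[:1], t[1:], body[:1], body[1:] are ported as the head/tail of
-- t.toList (exact: a PySem slice with these nat bounds is clamped take/drop)
def pvTCodeL : List Char → Option Int
  | [] => none
  | c :: body =>
      if c ≠ 'T' then none     -- t[:1] != "T"
      else if body = "IS".toList ∨ body = "IS(DCIS)".toList ∨ body = "IS(PAGET)".toList then
        some 0
      else
        match body with
        | [] => none           -- body[:1] = "" is no digit
        | d :: tail =>
            if d ∈ ['0', '1', '2', '3', '4'] then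
              let tails : List (List Char) :=
                if d = '1' then [[], "MI".toList, ['A'], ['B'], ['C']]
                else if d = '4' then [[], ['A'], ['B'], ['C'], ['D']]
                else [[]]
              if tail ∈ tails then some ((d.toNat : Int) - 48 + 1) else none  -- int(body[0]) + 1
            else none

def pvTCodeB (t : String) : Option Int := pvTCodeL t.toList

-- _n_code, same slicing convention
def pvNCodeL : List Char → Option Int
  | [] => none
  | c :: body =>
      if c ≠ 'N' then none
      else if body = ['0'] then some 0
      else if body = "1MI".toList ∨ body = "1MIC".toList then some 1
      else
        match body with
        | [] => none
        | d :: tail =>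
            if d ∈ ['1', '2', '3'] then
              let tails : List (List Char) :=
                if d = '2' then [[], ['A'], ['B']] else [[], ['A'], ['B'], ['C']]
              if tail ∈ tails then some ((d.toNat : Int) - 48 + 1) else none
            else none

def pvNCodeB (n : String) : Option Int := pvNCodeL n.toList

-- rows: T0..T4 (t_code-1); columns: N0, N1MI, N1, N2 (n_code)
def pvGridB : List (List String) :=
  [["Stage Not Determined", "Stage IB", "Stage IIA", "Stage IIIA"],
   ["Stage IA", "Stage IB", "Stage IIA", "Stage IIIA"],
   ["Stage IIA", "Stage Not Determined", "Stage IIB", "Stage IIIA"],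
   ["Stage IIB", "Stage Not Determined", "Stage IIIA", "Stage IIIA"],
   ["Stage IIIB", "Stage Not Determined", "Stage IIIB", "Stage IIIB"]]

-- Python's falsy tests `if not t or not n` / `m == "M1"` on Optional strings are ported by
-- defaulting None to "" (exact: a normalized stage is falsy iff it is None or "").
-- _STAGE_GRID[tc-1][nc]: both indices are always in range there, so pyGetD's default is never read
def determine_overall_stage_alt (matched_stages : List (String × String)) : String :=
  let d := PySem.Dict.ofList matched_stages
  let t := (pvNormB (d.get? "T")).getD ""
  let n := (pvNormB (d.get? "N")).getD ""
  let m := (pvNormB (d.get? "M")).getD ""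
  if m = "M1" then "Stage IV"
  else if t = "" ∨ n = "" then "Stage Not Determined"
  else if pvTCodeB t = some 0 then "Stage 0"
  else if pvNCodeB n = some 4 then "Stage IIIC"
  else if pvTCodeB t = none ∨ pvNCodeB n = none then "Stage Not Determined"
  else
    PySem.List.pyGetD (PySem.List.pyGetD pvGridB ((pvTCodeB t).getD 0 - 1) [])
      ((pvNCodeB n).getD 0) "Stage Not Determined"

-- ===== PRECONDITION & SPEC =====
def Spec_determine_overall_stage (matched_stages : List (String × String)) (out : String) : Prop := out = determine_overall_stage_alt matched_stages
instance (matched_stages : List (String × String)) (out : String) : Decidable (Spec_determine_overall_stage matched_stages out) := by unfold Spec_determine_overall_stage; infer_instance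

-- ===== CLAIM (what is proved, stated in full; the proofs are below) =====
def Claim_equal_determine_overall_stage : Prop := ∀ (matched_stages : List (String × String)), Dom_determine_overall_stage matched_stages → Spec_determine_overall_stage matched_stages (determine_overall_stage matched_stages)

-- ===== LEMMAS AND PROOFS =====

-- A's `p in s` test agrees with B's `s.find(p) >= 0` test, so the two prefix loops agree
lemma pv_loop_eq (s : String) (ps : List String) : pvPrefLoopA s ps = pvFindLoopB s ps := by
  induction ps with
  | nil => rfl
  | cons p rest ih =>
      by_cases hp : p.toList <:+: s.toList
      · have h1 : PySem.Chars.isIn p.toList s.toList = true :=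
          (PySem.Chars.isIn_iff_infix p.toList s.toList).mpr hp
        have h2 : 0 ≤ PySem.Chars.find s.toList p.toList :=
          (PySem.Chars.find_nonneg_iff s.toList p.toList).mpr hp
        simp [pvPrefLoopA, pvFindLoopB, h1, h2]
      · have h1 : ¬ PySem.Chars.isIn p.toList s.toList = true :=
          fun h => hp ((PySem.Chars.isIn_iff_infix p.toList s.toList).mp h)
        have h2 : ¬ 0 ≤ PySem.Chars.find s.toList p.toList :=
          fun h => hp ((PySem.Chars.find_nonneg_iff s.toList p.toList).mp h)
        simp [pvPrefLoopA, pvFindLoopB, h1, h2, ih]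

-- s[:1] as a character list
lemma pv_slice01_toList (s : String) :
    (PySem.Str.slice s (some 0) (some 1)).toList = s.toList.take 1 := by
  simp [PySem.Str.toList_slice]
  have := PySem.List.slice_to_natCast (xs := s.toList) (b := 1)
  simpa using this

-- A's `any(startswith)` test equals B's `s[:1] in ("T","N","M")` test
lemma pv_start_key (s : String) :
    ((["T", "N", "M"] : List String).any (fun x => PySem.Str.startswith s x) = true) ↔
      PySem.Str.slice s (some 0) (some 1) ∈ (["T", "N", "M"] : List String) := by
  have hmem : ∀ p : String, (PySem.Str.slice s (some 0) (some 1) = p) ↔ s.toList.take 1 = p.toList := by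
    intro p
    constructor
    · intro hq; rw [← pv_slice01_toList, hq]
    · intro hq; exact String.toList_inj.mp (by rw [pv_slice01_toList, hq])
  have hsw : ∀ (c : Char) (p : String), p.toList = [c] →
      ((PySem.Str.startswith s p = true) ↔ s.toList.take 1 = [c]) := by
    intro c p hp
    rw [show PySem.Str.startswith s p = PySem.Chars.startswith s.toList p.toList from rfl,
        PySem.Chars.startswith_iff, hp, List.prefix_iff_eq_take]
    constructor
    · intro hq; simpa using hq.symm
    · intro hq; simpa using hq.symm
  simp only [List.any_cons, List.any_nil, Bool.or_false, Bool.or_eq_true,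
    List.mem_cons, List.not_mem_nil, or_false]
  rw [hsw 'T' "T" rfl, hsw 'N' "N" rfl, hsw 'M' "M" rfl, hmem "T", hmem "N", hmem "M"]
  constructor
  · rintro (hq | hq | hq) <;> simp [hq]
  · rintro (hq | hq | hq) <;> simp [hq]

-- the two normalizers agree
lemma pv_norm_eq (o : Option String) : pvNormalizeA o = pvNormB o := by
  cases o with
  | none => rfl
  | some st =>
      by_cases h : st = ""
      · simp [pvNormalizeA, pvNormB, h]
      · simp only [pvNormalizeA, pvNormB, h, if_neg, not_false_iff]
        set s := PySem.Str.strip (PySem.Str.upper st) with hs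
        by_cases hc : PySem.Str.slice s (some 0) (some 1) ∈ (["T", "N", "M"] : List String)
        · have ha := (pv_start_key s).mpr hc
          simp only [List.any_cons, List.any_nil, Bool.or_false, Bool.or_eq_true] at ha
          rw [if_pos hc, if_neg (by simp; intro h1 h2; rcases ha with h' | h' | h' <;> simp_all)]
        · have ha : (["T", "N", "M"] : List String).any (fun x => PySem.Str.startswith s x) = false := by
            rw [← Bool.not_eq_true]
            exact fun hq => hc ((pv_start_key s).mp hq)
          rw [if_neg hc, if_pos ha]
          exact congrArg some (pv_loop_eq s _)

-- all T-literals and N-literals A compares against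
def pvAllT : List String :=
  ["TIS", "TIS(DCIS)", "TIS(PAGET)", "T0", "T1", "T1MI", "T1A", "T1B", "T1C",
   "T2", "T3", "T4", "T4A", "T4B", "T4C", "T4D"]
def pvAllN : List String :=
  ["N0", "N1MI", "N1MIC", "N1", "N1A", "N1B", "N1C",
   "N2", "N2A", "N2B", "N3", "N3A", "N3B", "N3C"]

-- the parser rejects everything outside the 16 T-literals
lemma pvTCodeL_none (l : List Char) (h : ∀ s ∈ pvAllT, l ≠ s.toList) : pvTCodeL l = none := by
  rcases l with _ | ⟨c, body⟩
  · rfl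
  · by_cases hc : c = 'T'
    case neg => simp [pvTCodeL, hc]
    subst hc
    have hIS : ¬(body = "IS".toList ∨ body = "IS(DCIS)".toList ∨ body = "IS(PAGET)".toList) := by
      rintro (rfl | rfl | rfl)
      · exact h "TIS" (by decide) (by decide)
      · exact h "TIS(DCIS)" (by decide) (by decide)
      · exact h "TIS(PAGET)" (by decide) (by decide)
    rcases body with _ | ⟨d, tail⟩
    · decide
    · by_cases hd : d ∈ ['0', '1', '2', '3', '4']
      case neg =>
        simp [pvTCodeL, hd]
        simp at hIS
        exact hIS
      fin_cases hd
      · have hni : tail ∉ ([[]] : List (List Char)) := by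
          intro hm; simp at hm; subst hm
          exact h "T0" (by decide) (by decide)
        simp [pvTCodeL]
        simp at hni
        exact hni
      · have hni : tail ∉ ([[], "MI".toList, ['A'], ['B'], ['C']] : List (List Char)) := by
          intro hm; simp at hm
          rcases hm with rfl | rfl | rfl | rfl | rfl
          · exact h "T1" (by decide) (by decide)
          · exact h "T1MI" (by decide) (by decide)
          · exact h "T1A" (by decide) (by decide)
          · exact h "T1B" (by decide) (by decide)
          · exact h "T1C" (by decide) (by decide)
        simp [pvTCodeL]
        simp at hni
        exact hni
      · have hni : tail ∉ ([[]] : List (List Char)) := by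
          intro hm; simp at hm; subst hm
          exact h "T2" (by decide) (by decide)
        simp [pvTCodeL]
        simp at hni
        exact hni
      · have hni : tail ∉ ([[]] : List (List Char)) := by
          intro hm; simp at hm; subst hm
          exact h "T3" (by decide) (by decide)
        simp [pvTCodeL]
        simp at hni
        exact hni
      · have hni : tail ∉ ([[], ['A'], ['B'], ['C'], ['D']] : List (List Char)) := by
          intro hm; simp at hm
          rcases hm with rfl | rfl | rfl | rfl | rfl
          · exact h "T4" (by decide) (by decide)
          · exact h "T4A" (by decide) (by decide)
          · exact h "T4B" (by decide) (by decide)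
          · exact h "T4C" (by decide) (by decide)
          · exact h "T4D" (by decide) (by decide)
        simp [pvTCodeL]
        simp at hni
        exact hni

-- the parser rejects everything outside the 14 N-literals
lemma pvNCodeL_none (l : List Char) (h : ∀ s ∈ pvAllN, l ≠ s.toList) : pvNCodeL l = none := by
  rcases l with _ | ⟨c, body⟩
  · rfl
  · by_cases hc : c = 'N'
    case neg => simp [pvNCodeL, hc]
    subst hc
    have h0 : body ≠ ['0'] := by
      rintro rfl; exact h "N0" (by decide) (by decide)
    have h1 : ¬(body = "1MI".toList ∨ body = "1MIC".toList) := by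
      rintro (rfl | rfl)
      · exact h "N1MI" (by decide) (by decide)
      · exact h "N1MIC" (by decide) (by decide)
    rcases body with _ | ⟨d, tail⟩
    · decide
    · by_cases hd : d ∈ ['1', '2', '3']
      case neg =>
        simp at h0 h1
        simp [pvNCodeL, hd]
        split_ifs with ha hb
        · exact absurd ha.2 (h0 ha.1)
        · rcases hb with ⟨hd1, ht⟩ | ⟨hd1, ht⟩
          · exact absurd ht (h1.1 hd1)
          · exact absurd ht (h1.2 hd1)
        · rfl
      fin_cases hd
      · have hni : tail ∉ ([[], ['A'], ['B'], ['C']] : List (List Char)) := by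
          intro hm; simp at hm
          rcases hm with rfl | rfl | rfl | rfl
          · exact h "N1" (by decide) (by decide)
          · exact h "N1A" (by decide) (by decide)
          · exact h "N1B" (by decide) (by decide)
          · exact h "N1C" (by decide) (by decide)
        simp at h0 h1 hni
        simp [pvNCodeL, h0, h1, hni]
      · have hni : tail ∉ ([[], ['A'], ['B']] : List (List Char)) := by
          intro hm; simp at hm
          rcases hm with rfl | rfl | rfl
          · exact h "N2" (by decide) (by decide)
          · exact h "N2A" (by decide) (by decide)
          · exact h "N2B" (by decide) (by decide)
        simp at h0 h1 hni
        simp [pvNCodeL, h0, h1, hni]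
      · have hni : tail ∉ ([[], ['A'], ['B'], ['C']] : List (List Char)) := by
          intro hm; simp at hm
          rcases hm with rfl | rfl | rfl | rfl
          · exact h "N3" (by decide) (by decide)
          · exact h "N3A" (by decide) (by decide)
          · exact h "N3B" (by decide) (by decide)
          · exact h "N3C" (by decide) (by decide)
        simp at h0 h1 hni
        simp [pvNCodeL, h0, h1, hni]

set_option maxHeartbeats 4000000 in
-- A's cascade equals B's classify-then-grid body, for every pair of strings
lemma pv_stage_eq (t n : String) :
    pvCascadeA t n =
      (if pvTCodeB t = some 0 then "Stage 0"
       else if pvNCodeB n = some 4 then "Stage IIIC"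
       else if pvTCodeB t = none ∨ pvNCodeB n = none then "Stage Not Determined"
       else
         PySem.List.pyGetD (PySem.List.pyGetD pvGridB ((pvTCodeB t).getD 0 - 1) [])
           ((pvNCodeB n).getD 0) "Stage Not Determined") := by
  by_cases ht : t ∈ pvAllT
  · by_cases hn : n ∈ pvAllN
    · simp only [pvAllT, List.mem_cons, List.not_mem_nil, or_false] at ht
      simp only [pvAllN, List.mem_cons, List.not_mem_nil, or_false] at hn
      rcases ht with rfl|rfl|rfl|rfl|rfl|rfl|rfl|rfl|rfl|rfl|rfl|rfl|rfl|rfl|rfl|rfl <;>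
        rcases hn with rfl|rfl|rfl|rfl|rfl|rfl|rfl|rfl|rfl|rfl|rfl|rfl|rfl|rfl <;> decide
    · have hnn : pvNCodeB n = none :=
        pvNCodeL_none n.toList (fun s hs he => hn (by rw [String.toList_inj.mp he]; exact hs))
      simp only [pvAllN, List.mem_cons, List.not_mem_nil, or_false] at hn
      push_neg at hn
      obtain ⟨h1, h2, h3, h4, h5, h6, h7, h8, h9, h10, h11, h12, h13, h14⟩ := hn
      simp only [pvAllT, List.mem_cons, List.not_mem_nil, or_false] at ht
      rcases ht with rfl|rfl|rfl|rfl|rfl|rfl|rfl|rfl|rfl|rfl|rfl|rfl|rfl|rfl|rfl|rfl <;>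
        simp [pvCascadeA, hnn, pvTCodeB, pvTCodeL,
          h1, h2, h3, h4, h5, h6, h7, h8, h9, h10, h11, h12, h13, h14,
          Ne.symm h1, Ne.symm h2, Ne.symm h3, Ne.symm h4, Ne.symm h5, Ne.symm h6, Ne.symm h7,
          Ne.symm h8, Ne.symm h9, Ne.symm h10, Ne.symm h11, Ne.symm h12, Ne.symm h13, Ne.symm h14]
  · have htn : pvTCodeB t = none :=
      pvTCodeL_none t.toList (fun s hs he => ht (by rw [String.toList_inj.mp he]; exact hs))
    by_cases hn : n ∈ pvAllN
    · simp only [pvAllT, List.mem_cons, List.not_mem_nil, or_false] at ht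
      push_neg at ht
      obtain ⟨g1, g2, g3, g4, g5, g6, g7, g8, g9, g10, g11, g12, g13, g14, g15, g16⟩ := ht
      simp only [pvAllN, List.mem_cons, List.not_mem_nil, or_false] at hn
      rcases hn with rfl|rfl|rfl|rfl|rfl|rfl|rfl|rfl|rfl|rfl|rfl|rfl|rfl|rfl <;>
        simp [pvCascadeA, htn, pvNCodeB, pvNCodeL,
          g1, g2, g3, g4, g5, g6, g7, g8, g9, g10, g11, g12, g13, g14, g15, g16,
          Ne.symm g1, Ne.symm g2, Ne.symm g3, Ne.symm g4, Ne.symm g5, Ne.symm g6, Ne.symm g7,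
          Ne.symm g8, Ne.symm g9, Ne.symm g10, Ne.symm g11, Ne.symm g12, Ne.symm g13,
          Ne.symm g14, Ne.symm g15, Ne.symm g16]
    · have hnn : pvNCodeB n = none :=
        pvNCodeL_none n.toList (fun s hs he => hn (by rw [String.toList_inj.mp he]; exact hs))
      simp only [pvAllT, List.mem_cons, List.not_mem_nil, or_false] at ht
      push_neg at ht
      obtain ⟨g1, g2, g3, g4, g5, g6, g7, g8, g9, g10, g11, g12, g13, g14, g15, g16⟩ := ht
      simp only [pvAllN, List.mem_cons, List.not_mem_nil, or_false] at hn
      push_neg at hn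
      obtain ⟨h1, h2, h3, h4, h5, h6, h7, h8, h9, h10, h11, h12, h13, h14⟩ := hn
      simp [pvCascadeA, htn, hnn,
        g1, g2, g3, g4, g5, g6, g7, g8, g9, g10, g11, g12, g13, g14, g15, g16,
        Ne.symm g1, Ne.symm g2, Ne.symm g3, Ne.symm g4, Ne.symm g5, Ne.symm g6, Ne.symm g7,
        Ne.symm g8, Ne.symm g9, Ne.symm g10, Ne.symm g11, Ne.symm g12, Ne.symm g13,
        Ne.symm g14, Ne.symm g15, Ne.symm g16,
        h1, h2, h3, h4, h5, h6, h7, h8, h9, h10, h11, h12, h13, h14,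
        Ne.symm h1, Ne.symm h2, Ne.symm h3, Ne.symm h4, Ne.symm h5, Ne.symm h6, Ne.symm h7,
        Ne.symm h8, Ne.symm h9, Ne.symm h10, Ne.symm h11, Ne.symm h12, Ne.symm h13, Ne.symm h14]

-- ===== VERDICT (by name: the statement is the Claim_ definition above) =====
theorem determine_overall_stage_spec : Claim_equal_determine_overall_stage := by
  intro ms _
  unfold Spec_determine_overall_stage determine_overall_stage determine_overall_stage_alt
  simp only [pv_norm_eq]
  have hmeq : ∀ o : Option String, (o = some "M1") ↔ (o.getD "" = "M1") := by
    intro o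
    cases o with
    | none => simp
    | some v => simp
  by_cases hm : pvNormB ((PySem.Dict.ofList ms).get? "M") = some "M1"
  · rw [if_pos hm, if_pos ((hmeq _).mp hm)]
  · rw [if_neg hm, if_neg (fun hx => hm ((hmeq _).mpr hx))]
    cases pvNormB ((PySem.Dict.ofList ms).get? "T") with
    | none =>
        cases pvNormB ((PySem.Dict.ofList ms).get? "N") <;> simp
    | some t =>
        cases pvNormB ((PySem.Dict.ofList ms).get? "N") with
        | none => simp
        | some n =>
            by_cases h1 : t = "" <;> by_cases h2 : n = "" <;>
              simp [h1, h2, pv_stage_eq]
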